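-- pv_equiv track=rewrite | github.com/daniel-reich/ubiquitous-fiesta | 7AA54JmzruLMwG6do_17.py | is_icecream_sandwich
-- ===== SOURCE A (Python) =====
-- def is_icecream_sandwich(txt):
--  if len(txt) < 3: return False
--  top = ''
--  for i in txt:
--   if i == txt[0]: top += i
--   else: break
--  t = len(top)
--  ics = [txt[:t], txt[t:-t], txt[-t:]]
--  return all([ics[0]==ics[2],len(set(ics[1]))==1,ics[1]!=''])
-- ===== SOURCE B (Python) =====
-- def is_icecream_sandwich(txt):
--     # Run-length encode txt, then check for exactly three runs with equal edge runs.
--     runs = []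
--     i = 0
--     n = len(txt)
--     while i < n:
--         j = i
--         while j < n and txt[j] == txt[i]:
--             j += 1
--         runs.append((txt[i], j - i))
--         i = j
--     return len(runs) == 3 and runs[0] == runs[2]
-- ===== Notes on version B (the rewrite author's own statement) =====
-- stated objective: alternative
-- what changed: B run-length-encodes the string into (char, count) runs and accepts exactly three runs whose first and last runs are equal, replacing A's leading-run scan followed by slice comparisons and a set-cardinality test on the middle slice.
import Mathlib
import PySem

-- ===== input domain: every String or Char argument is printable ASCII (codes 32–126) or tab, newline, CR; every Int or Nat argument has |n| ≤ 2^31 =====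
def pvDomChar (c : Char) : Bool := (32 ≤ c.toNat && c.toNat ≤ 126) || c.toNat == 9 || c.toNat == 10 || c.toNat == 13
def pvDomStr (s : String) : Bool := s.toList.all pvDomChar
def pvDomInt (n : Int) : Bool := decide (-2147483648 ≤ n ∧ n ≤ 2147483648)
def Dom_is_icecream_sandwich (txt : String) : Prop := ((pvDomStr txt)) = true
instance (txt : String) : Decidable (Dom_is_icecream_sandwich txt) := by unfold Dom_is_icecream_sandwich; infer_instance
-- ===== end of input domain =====

-- B replaces A's leading-run scan plus slice/set comparisons by a full run-length
-- encoding checked for exactly three runs with equal edge runs (objective: alternative).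

-- ===== PORT A =====
-- the 'for i in txt: if i == txt[0]: top += i else: break' loop
def pvTopLoop (c0 : Char) : List Char → List Char
  | [] => []
  | i :: rest => if i == c0 then i :: pvTopLoop c0 rest else []

def is_icecream_sandwich (txt : String) : Bool :=
  let cs := txt.toList
  if cs.length < 3 then false
  else
    match cs with
    | [] => false  -- unreachable: length ≥ 3
    | c0 :: _ =>
      let top := pvTopLoop c0 cs
      let t : Int := (top.length : Int)
      let ics0 := PySem.List.slice cs none (some t)          -- txt[:t]
      let ics1 := PySem.List.slice cs (some t) (some (-t))   -- txt[t:-t]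
      let ics2 := PySem.List.slice cs (some (-t)) none       -- txt[-t:]
      (ics0 == ics2) && ((PySem.Set.ofList ics1).length == 1) && !(ics1 == ([] : List Char))

-- ===== PORT B =====
-- the outer while loop: one step per run (inner while = takeWhile on the tail)
def pvRunsOf : List Char → List (Char × Nat)
  | [] => []
  | c :: cs =>
      let k := (cs.takeWhile (fun x => x == c)).length
      (c, k + 1) :: pvRunsOf (cs.drop k)
termination_by l => l.length
decreasing_by simp

def is_icecream_sandwich_alt (txt : String) : Bool :=
  let runs := pvRunsOf txt.toList
  (runs.length == 3) && (runs[0]? == runs[2]?)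

-- ===== PRECONDITION & SPEC =====
def Spec_is_icecream_sandwich (txt : String) (out : Bool) : Prop := out = is_icecream_sandwich_alt txt
instance (txt : String) (out : Bool) : Decidable (Spec_is_icecream_sandwich txt out) := by unfold Spec_is_icecream_sandwich; infer_instance

-- ===== CLAIM (what is proved, stated in full; the proofs are below) =====
def Claim_equal_is_icecream_sandwich : Prop := ∀ (txt : String), Dom_is_icecream_sandwich txt → Spec_is_icecream_sandwich txt (is_icecream_sandwich txt)

-- ===== LEMMAS AND PROOFS =====

-- the "sandwich" shape both programs recognise
def pvSandwich (l : List Char) : Prop :=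
  ∃ (c0 c1 : Char) (t m : Nat), c1 ≠ c0 ∧ 1 ≤ t ∧ 1 ≤ m ∧
    l = List.replicate t c0 ++ List.replicate m c1 ++ List.replicate t c0

theorem pvTopLoop_eq_takeWhile (c0 : Char) (l : List Char) :
    pvTopLoop c0 l = l.takeWhile (fun x => x == c0) := by
  induction l with
  | nil => rfl
  | cons a rest ih => cases h : (a == c0) <;> simp [pvTopLoop, h, ih]

theorem pvRunsOf_nil_iff (l : List Char) : pvRunsOf l = [] ↔ l = [] := by
  cases l <;> rw [pvRunsOf] <;> simp

theorem takeWhile_eq_replicate_self (c : Char) (l : List Char) :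
    l.takeWhile (fun x => x == c) = List.replicate (l.takeWhile (fun x => x == c)).length c := by
  induction l with
  | nil => rfl
  | cons a rest ih =>
    cases h : (a == c) <;> simp [h, List.replicate_succ]
    · exact ⟨(beq_iff_eq.mp h), ih⟩

theorem drop_length_takeWhile (p : Char → Bool) (l : List Char) :
    l.drop (l.takeWhile p).length = l.dropWhile p := by
  induction l with
  | nil => rfl
  | cons a rest ih => cases h : p a <;> simp [h, ih]

theorem takeWhile_replicate_append (c : Char) (n : Nat) (l : List Char)
    (hl : ∀ d, l.head? = some d → d ≠ c) :
    (List.replicate n c ++ l).takeWhile (fun x => x == c) = List.replicate n c := by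
  induction n with
  | zero =>
    cases l with
    | nil => rfl
    | cons a rest =>
      have ha := hl a rfl
      simp only [List.replicate_zero, List.nil_append]
      rw [List.takeWhile_cons_of_neg (by simpa using ha)]
  | succ n ih => simp [List.replicate_succ, ih]

theorem head?_dropWhile_ne (c : Char) (l : List Char) (d : Char)
    (h : (l.dropWhile (fun x => x == c)).head? = some d) : d ≠ c := by
  induction l with
  | nil => simp at h
  | cons a rest ih =>
    rw [List.dropWhile_cons] at h
    cases hb : (a == c)
    · rw [hb] at h; simp at h
      subst h; simpa using hb
    · rw [hb] at h; exact ih h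

theorem pvRunsOf_replicate_append (c : Char) (t : Nat) (ht : 1 ≤ t) (l : List Char)
    (hl : ∀ d, l.head? = some d → d ≠ c) :
    pvRunsOf (List.replicate t c ++ l) = (c, t) :: pvRunsOf l := by
  obtain ⟨n, rfl⟩ : ∃ n, t = n + 1 := ⟨t - 1, by omega⟩
  have hrep : List.replicate (n + 1) c ++ l = c :: (List.replicate n c ++ l) := by
    simp [List.replicate_succ]
  rw [hrep, pvRunsOf]
  have htw : ((List.replicate n c ++ l).takeWhile (fun x => x == c)).length = n := by
    rw [takeWhile_replicate_append c n l hl]; simp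
  rw [htw]
  congr 1
  rw [List.drop_append_of_le_length (by simp)]
  simp

theorem pvRunsOf_cons_elim (l : List Char) (c : Char) (t : Nat) (rs : List (Char × Nat))
    (h : pvRunsOf l = (c, t) :: rs) :
    ∃ l', l = List.replicate t c ++ l' ∧ 1 ≤ t ∧ (∀ d, l'.head? = some d → d ≠ c) ∧
      pvRunsOf l' = rs := by
  cases l with
  | nil => rw [pvRunsOf] at h; simp at h
  | cons a cs =>
    rw [pvRunsOf] at h
    simp only [List.cons.injEq, Prod.mk.injEq] at h
    obtain ⟨⟨rfl, rfl⟩, hrs⟩ := h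
    refine ⟨cs.drop (cs.takeWhile (fun x => x == a)).length, ?_, by omega, ?_, hrs⟩
    · rw [drop_length_takeWhile]
      conv_lhs => rw [← List.takeWhile_append_dropWhile (p := fun x => x == a) (l := cs)]
      rw [takeWhile_eq_replicate_self a cs]
      simp [List.replicate_succ]
    · intro d hd
      rw [drop_length_takeWhile] at hd
      exact head?_dropWhile_ne a cs d hd

theorem head?_replicate_append (c : Char) (m : Nat) (hm : 1 ≤ m) (r : List Char) :
    (List.replicate m c ++ r).head? = some c := by
  obtain ⟨n, rfl⟩ : ∃ n, m = n + 1 := ⟨m - 1, by omega⟩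
  simp [List.replicate_succ]

theorem alt_iff_sandwich (l : List Char) :
    (((pvRunsOf l).length == 3) && ((pvRunsOf l)[0]? == (pvRunsOf l)[2]?)) = true ↔ pvSandwich l := by
  constructor
  · intro h
    simp only [Bool.and_eq_true, beq_iff_eq] at h
    obtain ⟨hlen, hgetEq⟩ := h
    obtain ⟨r0, r1, r2, hr⟩ : ∃ r0 r1 r2, pvRunsOf l = [r0, r1, r2] := by
      match hm : pvRunsOf l with
      | [a, b, c] => exact ⟨a, b, c, rfl⟩
      | [] | [_] | [_, _] | _ :: _ :: _ :: _ :: _ => simp [hm] at hlen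
    rw [hr] at hgetEq
    simp only [List.getElem?_cons_zero, List.getElem?_cons_succ, Option.some.injEq] at hgetEq
    obtain ⟨c0, t⟩ := r0
    obtain ⟨c1, m⟩ := r1
    subst hgetEq
    obtain ⟨l1, hl1, ht, hh1, hrs1⟩ := pvRunsOf_cons_elim _ _ _ _ hr
    obtain ⟨l2, hl2, hm1, hh2, hrs2⟩ := pvRunsOf_cons_elim _ _ _ _ hrs1
    obtain ⟨l3, hl3, ht2, hh3, hrs3⟩ := pvRunsOf_cons_elim _ _ _ _ hrs2
    have hl3nil : l3 = [] := (pvRunsOf_nil_iff l3).mp hrs3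
    have hne : c1 ≠ c0 := by
      apply hh1 c1
      rw [hl2]
      exact head?_replicate_append c1 m hm1 l2
    subst hl3nil
    refine ⟨c0, c1, t, m, hne, ht, hm1, ?_⟩
    rw [hl1, hl2, hl3]
    simp
  · rintro ⟨c0, c1, t, m, hne, ht, hm, rfl⟩
    rw [List.append_assoc, pvRunsOf_replicate_append c0 t ht _ (by
        intro d hd
        rw [head?_replicate_append c1 m hm _] at hd
        cases hd; exact hne),
      pvRunsOf_replicate_append c1 m hm _ (by
        intro d hd
        rw [show (List.replicate t c0).head? = some c0 by
          simpa using head?_replicate_append c0 t ht []] at hd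
        cases hd; exact fun h => hne h.symm),
      show List.replicate t c0 = List.replicate t c0 ++ [] by simp,
      pvRunsOf_replicate_append c0 t ht [] (by intro d hd; simp at hd)]
    rw [pvRunsOf]
    simp

theorem ofList_replicate_pos (c : Char) (m : Nat) (hm : 1 ≤ m) :
    PySem.Set.ofList (List.replicate m c) = [c] := by
  induction m with
  | zero => omega
  | succ n ih =>
    rw [List.replicate_succ, PySem.Set.ofList_cons]
    cases n with
    | zero => rfl
    | succ k =>
      rw [ih (by omega)]
      simp [PySem.Set.discard]

theorem set_singleton_elim (mid : List Char) (h : (PySem.Set.ofList mid).length = 1) :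
    ∃ x, ∀ y ∈ mid, y = x := by
  match hS : PySem.Set.ofList mid with
  | [x] =>
    refine ⟨x, fun y hy => ?_⟩
    have hmem : y ∈ PySem.Set.ofList mid := (PySem.Set.mem_ofList mid y).mpr hy
    rw [hS] at hmem
    simpa using hmem
  | [] | _ :: _ :: _ => rw [hS] at h; simp at h

theorem slice_mid_eq (l : List Char) (t : Nat) (h : t ≤ l.length) (h2 : 0 < t) :
    PySem.List.slice l (some (t : Int)) (some (-(t : Int))) = (l.drop t).take (l.length - t - t) := by
  show (l.drop (PySem.List.clampIdx l.length (t : Int))).take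
      (PySem.List.clampIdx l.length (-(t : Int)) - PySem.List.clampIdx l.length (t : Int)) = _
  rw [PySem.List.clampIdx_neg_natCast _ _ h2, PySem.List.clampIdx_natCast, Nat.min_eq_left h]

theorem a_iff_sandwich (l : List Char) :
    is_icecream_sandwich (String.ofList l) = true ↔ pvSandwich l := by
  have hlen3 : pvSandwich l → 3 ≤ l.length := by
    rintro ⟨c0, c1, t, m, hne, ht, hm, rfl⟩; simp; omega
  simp only [is_icecream_sandwich, String.toList_ofList]
  by_cases hlt : l.length < 3
  · rw [if_pos hlt]
    constructor
    · intro h; simp at h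
    · intro hs; exact absurd (hlen3 hs) (by omega)
  · rw [if_neg hlt]
    cases l with
    | nil => simp at hlt
    | cons c0 rest =>
    simp only
    set l := c0 :: rest with hl
    clear_value l
    set T := (pvTopLoop c0 l).length with hT
    clear_value T
    have htw : pvTopLoop c0 l = l.takeWhile (fun x => x == c0) := pvTopLoop_eq_takeWhile c0 l
    set r := l.dropWhile (fun x => x == c0) with hr
    clear_value r
    have hsplit : l = List.replicate T c0 ++ r := by
      conv_lhs => rw [← List.takeWhile_append_dropWhile (p := fun x => x == c0) (l := l)]
      rw [← hr, takeWhile_eq_replicate_self, hT, htw]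
    have hhead : ∀ d, r.head? = some d → d ≠ c0 := by
      intro d hd
      rw [hr] at hd
      exact head?_dropWhile_ne c0 l d hd
    have hT1 : 1 ≤ T := by
      rw [hT, htw, hl, List.takeWhile_cons_of_pos (by simp)]
      simp
    have hTle : T ≤ l.length := by
      rw [hT, htw]
      exact List.IsPrefix.length_le (List.takeWhile_prefix _)
    have hrlen : l.length = T + r.length := by
      conv_lhs => rw [hsplit]
      simp
    rw [PySem.List.slice_to_natCast, PySem.List.slice_from_neg_natCast _ _ hT1,
        slice_mid_eq l T hTle hT1]
    set mid := (l.drop T).take (l.length - T - T) with hmid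
    clear_value mid
    have hdropT : l.drop T = r := by
      conv_lhs => rw [hsplit]
      exact List.drop_left' (by simp)
    have htake : l.take T = List.replicate T c0 := by
      conv_lhs => rw [hsplit]
      exact List.take_left' (by simp)
    simp only [Bool.and_eq_true, beq_iff_eq, Bool.not_eq_eq_eq_not, Bool.not_true,
      beq_eq_false_iff_ne, ne_eq]
    constructor
    · rintro ⟨⟨h02, hset⟩, hne⟩
      obtain ⟨x, hx⟩ := set_singleton_elim mid (by simpa using hset)
      set k := l.length - T - T with hkdef
      clear_value k
      have hmidr : mid = r.take k := by rw [hmid, hdropT]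
      have hmidlen0 : mid.length ≠ 0 := by simpa using hne
      have hk : 1 ≤ k ∧ 1 ≤ r.length := by
        rw [hmidr, List.length_take] at hmidlen0
        omega
      have hmidlen : mid.length = k := by
        rw [hmidr, List.length_take, Nat.min_eq_left (by omega)]
      have hmidrep : mid = List.replicate k x := by
        rw [← hmidlen]
        exact List.eq_replicate_of_mem hx
      have harith : l.length - T = T + k := by omega
      have hdropBack : l.drop (l.length - T) = r.drop k := by
        conv_lhs => rw [harith, hsplit]
        rw [show T + k = (List.replicate T c0).length + k by simp]
        simp [List.drop_append]
      have hbak : r.drop k = List.replicate T c0 := by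
        rw [← hdropBack, ← h02, htake]
      have hrdecomp : r = List.replicate k x ++ List.replicate T c0 := by
        conv_lhs => rw [← List.take_append_drop k r]
        rw [← hmidr, hmidrep, hbak]
      have hxc0 : x ≠ c0 := by
        apply hhead x
        rw [hrdecomp]
        exact head?_replicate_append x k hk.1 _
      exact ⟨c0, x, T, k, hxc0, hT1, hk.1, by rw [hsplit, hrdecomp, List.append_assoc]⟩
    · rintro ⟨c0', c1, t, m, hne', ht', hm', heq⟩
      rw [List.append_assoc] at heq
      have hc0 : c0' = c0 := by
        have hh := congrArg List.head? heq
        rw [head?_replicate_append c0' t ht', hl] at hh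
        simpa using hh.symm
      subst hc0
      have hTt : T = t := by
        rw [hT, htw, heq, takeWhile_replicate_append c0' t _ (by
          intro d hd
          rw [head?_replicate_append c1 m hm' _] at hd
          cases hd
          exact hne')]
        simp
      have hlenl : l.length = t + (m + t) := by
        rw [heq]; simp
      have hdrop2 : l.drop T = List.replicate m c1 ++ List.replicate t c0' := by
        rw [hTt]
        conv_lhs => rw [heq]
        exact List.drop_left' (by simp)
      refine ⟨⟨?_, ?_⟩, ?_⟩
      · rw [htake, hTt, show l.length - t = t + m by omega]
        conv_rhs => rw [heq]
        simp [List.drop_append]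
      · rw [hmid, hdrop2, hTt,
          show l.length - t - t = m by omega,
          List.take_left' (by simp), ofList_replicate_pos c1 m hm']
        rfl
      · rw [hmid, hdrop2, hTt, show l.length - t - t = m by omega,
          List.take_left' (by simp)]
        simp
        omega

-- ===== VERDICT (by name: the statement is the Claim_ definition above) =====
theorem is_icecream_sandwich_spec : Claim_equal_is_icecream_sandwich := by
  intro txt _
  unfold Spec_is_icecream_sandwich
  have h1 := a_iff_sandwich txt.toList
  have h2 := alt_iff_sandwich txt.toList
  rw [String.ofList_toList] at h1
  unfold is_icecream_sandwich_alt
  exact Bool.eq_iff_iff.mpr (h1.trans h2.symm)
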